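-- pv_equiv track=rewrite | github.com/Salome2010/IntroProgramacion | ipguia7.py | columnas_ordenadas
-- ===== SOURCE A (Python) =====
-- def ordenados(s:[int]) -> bool:
--     i:int=0
--     while(i<(len(s)-1)):
--         if(s[i]>s[i+1]):
--             return False
--         i+=1
--     return True
--
--     """for i in range(len(s)-1):
--         if(s[i]>s[i+1]):
--             return False
--     return True"""
--
-- def columna(m:[[int]],c:int) -> [int]:
--     for i in range(len(m)):
--         if (i==c):
--             return m[i]
--
-- def columnas_ordenadas(m:[[int]])-> [bool]:
--     resu:[bool]=[]
--     for i in range(len(m)):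
--         if ordenados(columna(m,i)):
--             resu.append(True)
--         else:
--             resu.append(False)
--     return resu
-- ===== SOURCE B (Python) =====
-- def columnas_ordenadas(m):
--     return [row == sorted(row) for row in m]
-- ===== Notes on version B (the rewrite author's own statement) =====
-- stated objective: idiomatic
-- what changed: B replaces A's index-based per-row forward pairwise scan (with a helper that re-scans the matrix to fetch each row) by a sort-and-compare: each row is tested by comparing it to its sorted copy, in a single list comprehension.
import Mathlib
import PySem

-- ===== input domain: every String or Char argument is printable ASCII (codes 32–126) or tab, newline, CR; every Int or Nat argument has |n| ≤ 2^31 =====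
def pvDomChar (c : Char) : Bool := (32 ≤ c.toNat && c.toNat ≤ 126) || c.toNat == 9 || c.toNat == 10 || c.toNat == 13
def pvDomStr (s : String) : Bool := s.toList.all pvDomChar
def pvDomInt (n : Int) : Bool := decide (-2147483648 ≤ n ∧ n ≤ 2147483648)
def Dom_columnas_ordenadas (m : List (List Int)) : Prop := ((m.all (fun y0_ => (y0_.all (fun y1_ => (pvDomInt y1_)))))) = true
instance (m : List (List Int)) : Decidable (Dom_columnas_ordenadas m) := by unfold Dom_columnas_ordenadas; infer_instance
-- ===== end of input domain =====

-- B tests each row by comparing it with its sorted copy instead of A's index-based pairwise scan. (idiomatic)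
-- ===== PORT A =====
-- while(i < len(s)-1): if s[i]>s[i+1]: return False; i+=1   -- indices always in range, getD default unreachable
def ordenadosGo (s : List Int) (i : Nat) : Bool :=
  if _h : i < s.length - 1 then
    if s.getD i 0 > s.getD (i+1) 0 then false
    else ordenadosGo s (i+1)
  else true
termination_by s.length - 1 - i

def ordenados (s : List Int) : Bool := ordenadosGo s 0

-- for i in range(len(m)): if i==c: return m[i]   (falls through to None → none)
def columnaGo (m : List (List Int)) (c : Int) (idxs : List Int) : Option (List Int) :=
  match idxs with
  | [] => none
  | i :: rest => if i == c then PySem.List.pyGet? m i else columnaGo m c rest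

def columna (m : List (List Int)) (c : Int) : Option (List Int) :=
  columnaGo m c (PySem.List.pyRange 0 m.length 1)

-- columna m i is always some m[i] here (i in range), so the .getD [] default is unreachable
def columnas_ordenadas (m : List (List Int)) : List Bool :=
  (PySem.List.pyRange 0 m.length 1).foldl
    (fun resu i => resu ++ [if ordenados ((columna m i).getD []) then true else false]) []

-- ===== PORT B =====
def columnas_ordenadas_alt (m : List (List Int)) : List Bool :=
  m.map (fun row => row == PySem.List.sorted row (fun x => x) false)

-- ===== PRECONDITION & SPEC =====
def Spec_columnas_ordenadas (m : List (List Int)) (out : List Bool) : Prop := out = columnas_ordenadas_alt m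
instance (m : List (List Int)) (out : List Bool) : Decidable (Spec_columnas_ordenadas m out) := by unfold Spec_columnas_ordenadas; infer_instance

-- ===== CLAIM (what is proved, stated in full; the proofs are below) =====
def Claim_equal_columnas_ordenadas : Prop := ∀ (m : List (List Int)), Dom_columnas_ordenadas m → Spec_columnas_ordenadas m (columnas_ordenadas m)

-- ===== LEMMAS AND PROOFS =====
-- ordenadosGo from position i is the adjacent-pair check on the suffix
lemma ordenadosGo_iff (s : List Int) (i : Nat) :
    ordenadosGo s i = true ↔ ∀ j, i ≤ j → j + 1 < s.length → s.getD j 0 ≤ s.getD (j+1) 0 := by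
  fun_induction ordenadosGo s i with
  | case1 i h hgt =>
    constructor
    · intro hc; simp at hc
    · intro hall
      exact absurd (hall i le_rfl (by omega)) (not_le.mpr hgt)
  | case2 i h hgt ih =>
    rw [ih]
    constructor
    · intro hall j hij hj
      rcases Nat.eq_or_lt_of_le hij with rfl | hlt
      · omega
      · exact hall j hlt hj
    · intro hall j hij hj
      exact hall j (by omega) hj
  | case3 i h =>
    constructor
    · intro _ j hij hj; omega
    · intro _; rfl

lemma ordenados_iff_chain (s : List Int) :
    ordenados s = true ↔ s.IsChain (· ≤ ·) := by
  rw [ordenados, ordenadosGo_iff, List.isChain_iff_getElem]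
  constructor
  · intro h j hj
    have := h j (Nat.zero_le _) hj
    simpa [List.getD_eq_getElem?_getD, List.getElem?_eq_getElem (by omega : j < s.length),
      List.getElem?_eq_getElem hj] using this
  · intro h j _ hj
    have := h j hj
    simpa [List.getD_eq_getElem?_getD, List.getElem?_eq_getElem (by omega : j < s.length),
      List.getElem?_eq_getElem hj] using this

lemma ordenados_eq_sorted_beq (row : List Int) :
    ordenados row = (row == PySem.List.sorted row (fun x => x) false) := by
  by_cases h : ordenados row = true
  · rw [h]
    have hp : row.Pairwise (fun a b => (fun x : Int => x) a ≤ (fun x : Int => x) b) :=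
      ((ordenados_iff_chain row).mp h).pairwise
    rw [PySem.List.sorted_eq_self_of_pairwise _ _ hp]
    simp
  · rw [Bool.not_eq_true] at h
    rw [h]
    symm
    rw [beq_eq_false_iff_ne]
    intro heq
    apply absurd _ (h ▸ (Bool.false_ne_true))
    rw [ordenados_iff_chain, List.isChain_iff_pairwise]
    have := PySem.List.sorted_pairwise row (fun x : Int => x)
    rw [← heq] at this
    exact this

lemma columnaGo_mem (m : List (List Int)) (c : Int) (idxs : List Int) (hc : c ∈ idxs) :
    columnaGo m c idxs = PySem.List.pyGet? m c := by
  induction idxs with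
  | nil => cases hc
  | cons i rest ih =>
    simp only [columnaGo]
    by_cases h : i == c
    · rw [if_pos h]; rw [eq_of_beq h]
    · rw [if_neg h]
      apply ih
      rcases List.mem_cons.mp hc with rfl | h'
      · exact absurd (beq_iff_eq.mpr rfl) h
      · exact h'

lemma columna_eq (m : List (List Int)) (j : Nat) (hj : j < m.length) :
    columna m (j : Int) = some (m.getD j []) := by
  rw [columna, columnaGo_mem]
  · rw [PySem.List.pyGet?_natCast]
    simp [List.getD_eq_getElem?_getD, List.getElem?_eq_getElem hj]
  · rw [PySem.List.mem_pyRange_one]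
    omega

-- the foldl over range(len m) produces the map over the corresponding suffix of m
lemma foldl_body (m : List (List Int)) :
    ∀ (n : Nat) (acc : List Bool), n ≤ m.length →
    ((PySem.List.pyRange ((m.length : Int) - n) m.length 1).foldl
      (fun resu i => resu ++ [if ordenados ((columna m i).getD []) then true else false]) acc)
    = acc ++ (m.drop (m.length - n)).map
        (fun row => row == PySem.List.sorted row (fun x => x) false) := by
  intro n
  induction n with
  | zero =>
    intro acc _
    rw [PySem.List.pyRange_one_eq_nil (by omega)]
    simp
  | succ k ih =>
    intro acc hn
    have hlt : m.length - (k+1) < m.length := by omega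
    rw [PySem.List.pyRange_one_cons (by omega)]
    simp only [List.foldl_cons]
    have h1 : ((m.length : Int) - ((k+1 : Nat) : Int) + 1) = (m.length : Int) - ((k : Nat) : Int) := by
      omega
    rw [h1, ih _ (by omega)]
    have h2 : ((m.length : Int) - ((k+1 : Nat) : Int)) = ((m.length - (k+1) : Nat) : Int) := by
      rw [Nat.cast_sub hn]
    rw [h2, columna_eq m _ hlt]
    have hdrop : m.drop (m.length - (k+1)) =
        m.getD (m.length - (k+1)) [] :: m.drop (m.length - k) := by
      rw [List.drop_eq_getElem_cons hlt,
        show m.length - (k+1) + 1 = m.length - k from by omega]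
      congr 1
      simp [List.getD_eq_getElem?_getD, List.getElem?_eq_getElem hlt]
    rw [hdrop]
    simp only [Option.getD_some, List.map_cons, List.append_assoc, List.singleton_append]
    simp only [ordenados_eq_sorted_beq]
    simp
    rw [Bool.eq_iff_iff]
    simp

-- ===== VERDICT (by name: the statement is the Claim_ definition above) =====
theorem columnas_ordenadas_spec : Claim_equal_columnas_ordenadas := by
  intro m _
  show columnas_ordenadas m = columnas_ordenadas_alt m
  unfold columnas_ordenadas columnas_ordenadas_alt
  have := foldl_body m m.length [] le_rfl
  simpa using this
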